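-- pv_equiv track=rewrite | github.com/tommasocarraro/SemNeSyKTRecSys | nesy/paths.py | get_clauses
-- ===== SOURCE A (Python) =====
-- def make_where_clause(hops: int) -> str:
--     where_clause = ""
--     start = 1
--     end = start + hops
--     for current_node in range(start, end):
--         for successor in range(current_node + 1, end):
--             where_clause += (
--                 f"{' and ' if len(where_clause) > 0 else ''}"
--                 + f"n{current_node} != n{successor}"
--             )
--     return where_clause
--
-- def get_clauses(source: str, target: str, max_hops: int) -> list[tuple[str, str, str]]:
--     res = []
--     for i in range(1, max_hops + 1):
--         node_counter = 2
--         rel_counter = 1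
--         match_clause = f"(n1:{source})"
--         where_clause = make_where_clause(i)
--         return_clause = "n1 as source, "
--         for hop in range(1, i + 1):
--             match_clause += f"-[r{rel_counter}]->(n{node_counter}{f':{target}' if hop == i else ''})"
--             return_clause += (
--                 f"r{rel_counter}.label as label{rel_counter}, "
--                 + f"{f'n{node_counter} as intermediate{node_counter-1}, ' if hop != i else ''}"
--             )
--             if hop != i:
--                 node_counter += 1
--             rel_counter += 1
--         return_clause += f"n{node_counter} as target"
--         res.append((match_clause, where_clause, return_clause))
--     return res
-- ===== SOURCE B (Python) =====
-- def get_clauses(source: str, target: str, max_hops: int) -> list[tuple[str, str, str]]: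
--     res = []
--     match_prefix = f"(n1:{source})"
--     return_prefix = "n1 as source, "
--     for i in range(1, max_hops + 1):
--         where_clause = " and ".join(
--             f"n{c} != n{s}" for c in range(1, i + 1) for s in range(c + 1, i + 1)
--         )
--         res.append((
--             match_prefix + f"-[r{i}]->(n{i + 1}:{target})",
--             where_clause,
--             return_prefix + f"r{i}.label as label{i}, n{i + 1} as target",
--         ))
--         match_prefix += f"-[r{i}]->(n{i + 1})"
--         return_prefix += f"r{i}.label as label{i}, n{i + 1} as intermediate{i}, "
--     return res
-- ===== Notes on version B (the rewrite author's own statement) =====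
-- stated objective: simpler
-- what changed: B keeps running match/return prefix strings across hop counts and emits each row by appending a target-specific suffix, and builds the where clause with a single ' and '.join over a comprehension, replacing A's per-row counter loop and its guarded string accumulation.
import Mathlib
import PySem

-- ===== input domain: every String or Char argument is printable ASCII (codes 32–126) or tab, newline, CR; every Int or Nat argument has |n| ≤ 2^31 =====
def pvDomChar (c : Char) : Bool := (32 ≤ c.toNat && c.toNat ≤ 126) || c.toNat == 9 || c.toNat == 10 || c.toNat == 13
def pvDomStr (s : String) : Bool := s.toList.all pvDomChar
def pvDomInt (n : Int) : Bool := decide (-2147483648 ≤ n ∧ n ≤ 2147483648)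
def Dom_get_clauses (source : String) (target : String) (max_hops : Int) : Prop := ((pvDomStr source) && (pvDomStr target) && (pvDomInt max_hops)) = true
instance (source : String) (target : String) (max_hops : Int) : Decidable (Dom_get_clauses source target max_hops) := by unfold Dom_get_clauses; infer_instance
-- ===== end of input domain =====

-- B builds the rows incrementally (running match/return prefixes, where-clause via a single " and ".join)
-- instead of A's per-row inner counter loop and guarded string accumulation; objective: simpler. A = B everywhere.

-- ===== PORT A =====
def make_where_clause (hops : Int) : String :=
  (PySem.List.pyRange 1 (1 + hops) 1).foldl
    (fun where_clause current_node =>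
      (PySem.List.pyRange (current_node + 1) (1 + hops) 1).foldl
        (fun where_clause successor =>
          where_clause ++
            ((if PySem.Str.len where_clause > 0 then " and " else "") ++
              ("n" ++ PySem.Int.toStr current_node ++ " != n" ++ PySem.Int.toStr successor)))
        where_clause)
    ""

-- the body of A's inner `for hop in range(1, i + 1)` loop; state = (match_clause, return_clause, node_counter, rel_counter)
def pvAstep (target : String) (i : Int) (s : String × String × Int × Int) (hop : Int) :
    String × String × Int × Int :=
  (s.1 ++ ("-[r" ++ PySem.Int.toStr s.2.2.2 ++ "]->(n" ++ PySem.Int.toStr s.2.2.1 ++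
      (if hop = i then ":" ++ target else "") ++ ")"),
   s.2.1 ++ ("r" ++ PySem.Int.toStr s.2.2.2 ++ ".label as label" ++ PySem.Int.toStr s.2.2.2 ++ ", " ++
      (if hop ≠ i then "n" ++ PySem.Int.toStr s.2.2.1 ++ " as intermediate" ++
        PySem.Int.toStr (s.2.2.1 - 1) ++ ", " else "")),
   (if hop ≠ i then s.2.2.1 + 1 else s.2.2.1),
   s.2.2.2 + 1)

-- the body of A's outer `for i in range(1, max_hops + 1)` loop
def pvAouter (source target : String) (res : List (String × String × String)) (i : Int) :
    List (String × String × String) :=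
  let st := (PySem.List.pyRange 1 (i + 1) 1).foldl (pvAstep target i)
    ("(n1:" ++ source ++ ")", "n1 as source, ", 2, 1)
  res ++ [(st.1, make_where_clause i, st.2.1 ++ ("n" ++ PySem.Int.toStr st.2.2.1 ++ " as target"))]

def get_clauses (source : String) (target : String) (max_hops : Int) : List (String × String × String) :=
  (PySem.List.pyRange 1 (max_hops + 1) 1).foldl (pvAouter source target) []

-- ===== PORT B =====
-- the row B emits for hop count i, from the running prefixes mp (match) and rp (return)
def pvBrow (target mp rp : String) (i : Int) : String × String × String :=
  (mp ++ ("-[r" ++ PySem.Int.toStr i ++ "]->(n" ++ PySem.Int.toStr (i + 1) ++ ":" ++ target ++ ")"),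
   PySem.Str.join " and "
     ((PySem.List.pyRange 1 (i + 1) 1).flatMap (fun c =>
       (PySem.List.pyRange (c + 1) (i + 1) 1).map (fun s =>
         "n" ++ PySem.Int.toStr c ++ " != n" ++ PySem.Int.toStr s))),
   rp ++ ("r" ++ PySem.Int.toStr i ++ ".label as label" ++ PySem.Int.toStr i ++ ", n" ++
     PySem.Int.toStr (i + 1) ++ " as target"))

-- B's loop body: emit the row, then extend both prefixes
def pvBstep (target : String) (st : List (String × String × String) × String × String) (i : Int) :
    List (String × String × String) × String × String :=
  (st.1 ++ [pvBrow target st.2.1 st.2.2 i],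
   st.2.1 ++ ("-[r" ++ PySem.Int.toStr i ++ "]->(n" ++ PySem.Int.toStr (i + 1) ++ ")"),
   st.2.2 ++ ("r" ++ PySem.Int.toStr i ++ ".label as label" ++ PySem.Int.toStr i ++ ", n" ++
     PySem.Int.toStr (i + 1) ++ " as intermediate" ++ PySem.Int.toStr i ++ ", "))

def get_clauses_alt (source : String) (target : String) (max_hops : Int) : List (String × String × String) :=
  ((PySem.List.pyRange 1 (max_hops + 1) 1).foldl (pvBstep target)
    ([], "(n1:" ++ source ++ ")", "n1 as source, ")).1

-- ===== PRECONDITION & SPEC =====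
def Spec_get_clauses (source : String) (target : String) (max_hops : Int) (out : List (String × String × String)) : Prop := out = get_clauses_alt source target max_hops
instance (source : String) (target : String) (max_hops : Int) (out : List (String × String × String)) : Decidable (Spec_get_clauses source target max_hops out) := by unfold Spec_get_clauses; infer_instance

-- ===== CLAIM (what is proved, stated in full; the proofs are below) =====
def Claim_equal_get_clauses : Prop := ∀ (source : String) (target : String) (max_hops : Int), Dom_get_clauses source target max_hops → Spec_get_clauses source target max_hops (get_clauses source target max_hops)

-- ===== LEMMAS AND PROOFS =====

-- closed forms for the running prefixes and the emitted rows
def pvPieceM (i : Int) : String :=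
  "-[r" ++ PySem.Int.toStr i ++ "]->(n" ++ PySem.Int.toStr (i + 1) ++ ")"
def pvPieceR (i : Int) : String :=
  "r" ++ PySem.Int.toStr i ++ ".label as label" ++ PySem.Int.toStr i ++ ", n" ++
    PySem.Int.toStr (i + 1) ++ " as intermediate" ++ PySem.Int.toStr i ++ ", "
def pvMP (src : String) : Nat → String
  | 0 => "(n1:" ++ src ++ ")"
  | k + 1 => pvMP src k ++ pvPieceM ((k : Int) + 1)
def pvRP : Nat → String
  | 0 => "n1 as source, "
  | k + 1 => pvRP k ++ pvPieceR ((k : Int) + 1)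
def pvRows (src tgt : String) : Nat → List (String × String × String)
  | 0 => []
  | k + 1 => pvRows src tgt k ++ [pvBrow tgt (pvMP src k) (pvRP k) ((k : Int) + 1)]

theorem pv_comma_n (s : String) : ", " ++ ("n" ++ s) = ", n" ++ s := by
  have h : (", " ++ "n" : String) = ", n" := rfl
  rw [← String.append_assoc, h]

theorem pvChars_intercalate_cons (sep x : List Char) (ys : List (List Char)) :
    sep.intercalate (x :: ys) = x ++ if ys = [] then [] else sep ++ sep.intercalate ys := by
  cases ys <;> simp [List.intercalate, List.intersperse]

theorem pv_join_cons (sep p : String) (r : List String) :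
    PySem.Str.join sep (p :: r) = p ++ PySem.Str.join sep ("" :: r) := by
  cases r <;>
    simp [PySem.Str.join, PySem.Chars.join, pvChars_intercalate_cons, String.ofList_append,
      String.ofList_toList]

theorem pv_join_blank_cons (sep p : String) (r : List String) :
    PySem.Str.join sep ("" :: p :: r) = sep ++ PySem.Str.join sep (p :: r) := by
  simp [PySem.Str.join, PySem.Chars.join, pvChars_intercalate_cons, String.ofList_append,
    String.ofList_toList]

theorem pv_join_blank_nil (sep : String) : PySem.Str.join sep [""] = "" := by
  simp [PySem.Str.join, PySem.Chars.join, List.intercalate]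

theorem pv_len_pos_append (w x : String) (h : 0 < PySem.Str.len w) : 0 < PySem.Str.len (w ++ x) := by
  simp [PySem.Str.len_eq] at *
  omega

theorem pv_len_piece (c s : Int) :
    0 < PySem.Str.len ("n" ++ PySem.Int.toStr c ++ " != n" ++ PySem.Int.toStr s) := by
  simp [PySem.Str.len_eq]
  omega

theorem pv_guard_aux (sep : String) (P : List String) :
    ∀ (w : String), 0 < PySem.Str.len w →
      P.foldl (fun w p => w ++ ((if PySem.Str.len w > 0 then sep else "") ++ p)) w
        = w ++ PySem.Str.join sep ("" :: P) := by
  induction P with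
  | nil => intro w hw; simp [pv_join_blank_nil]
  | cons p P ih =>
    intro w hw
    simp only [List.foldl_cons]
    rw [if_pos hw, ih (w ++ (sep ++ p)) (pv_len_pos_append _ _ hw)]
    rw [pv_join_blank_cons sep p P, pv_join_cons sep p P]
    simp [String.append_assoc]

theorem pv_guard_join (sep : String) (P : List String) (hP : ∀ p ∈ P, 0 < PySem.Str.len p) :
    P.foldl (fun w p => w ++ ((if PySem.Str.len w > 0 then sep else "") ++ p)) ""
      = PySem.Str.join sep P := by
  cases P with
  | nil => rfl
  | cons p P =>
    simp only [List.foldl_cons]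
    rw [if_neg (by simp [PySem.Str.len_eq])]
    have hp : 0 < PySem.Str.len p := hP p (by simp)
    have h0 : ("" : String) ++ ("" ++ p) = p := by simp
    rw [h0, pv_guard_aux sep P p hp]
    exact (pv_join_cons sep p P).symm

theorem pv_where_eq (i : Int) :
    make_where_clause i = PySem.Str.join " and "
      ((PySem.List.pyRange 1 (i + 1) 1).flatMap (fun c =>
        (PySem.List.pyRange (c + 1) (i + 1) 1).map (fun s =>
          "n" ++ PySem.Int.toStr c ++ " != n" ++ PySem.Int.toStr s))) := by
  have h1 : (1 : Int) + i = i + 1 := by ring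
  unfold make_where_clause
  rw [h1]
  rw [← pv_guard_join " and " _ (by
    intro p hp
    simp only [List.mem_flatMap, List.mem_map] at hp
    obtain ⟨c, _, s, _, rfl⟩ := hp
    exact pv_len_piece c s)]
  simp only [List.foldl_flatMap, List.foldl_map]

theorem pv_innerA (target src : String) (i : Int) :
    ∀ (k : Nat), (k : Int) < i →
      (PySem.List.pyRange 1 ((k : Int) + 1) 1).foldl (pvAstep target i)
        ("(n1:" ++ src ++ ")", "n1 as source, ", 2, 1)
        = (pvMP src k, pvRP k, (k : Int) + 2, (k : Int) + 1) := by
  intro k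
  induction k with
  | zero => intro _; simp [PySem.List.pyRange_one_eq_nil (le_refl (1 : Int)), pvMP, pvRP]
  | succ k ih =>
    intro h
    have hk : (k : Int) < i := by push_cast at h; omega
    have hcast : ((k + 1 : Nat) : Int) = (k : Int) + 1 := by push_cast; ring
    rw [hcast, PySem.List.pyRange_one_succ_right (by omega : (1 : Int) ≤ (k : Int) + 1),
      List.foldl_append, ih hk]
    have hne : ¬ ((k : Int) + 1 = i) := by push_cast at h; omega
    have h2 : (k : Int) + 1 + 1 = (k : Int) + 2 := by ring
    have h3 : (k : Int) + 2 - 1 = (k : Int) + 1 := by ring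
    have h4 : (k : Int) + 1 + 2 = (k : Int) + 3 := by ring
    have h5 : (k : Int) + 2 + 1 = (k : Int) + 3 := by ring
    unfold pvAstep
    simp [pvMP, pvRP, pvPieceM, pvPieceR, hne, String.append_assoc, pv_comma_n, h2, h3, h4, h5]

theorem pv_outerA (src tgt : String) :
    ∀ (k : Nat), (PySem.List.pyRange 1 ((k : Int) + 1) 1).foldl (pvAouter src tgt) []
      = pvRows src tgt k := by
  intro k
  induction k with
  | zero => simp [PySem.List.pyRange_one_eq_nil (le_refl (1 : Int)), pvRows]
  | succ k ih =>
    have hcast : ((k + 1 : Nat) : Int) = (k : Int) + 1 := by push_cast; ring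
    rw [hcast, PySem.List.pyRange_one_succ_right (by omega : (1 : Int) ≤ (k : Int) + 1),
      List.foldl_append, ih]
    show pvAouter src tgt (pvRows src tgt k) ((k : Int) + 1) = pvRows src tgt (k + 1)
    unfold pvAouter
    rw [PySem.List.pyRange_one_succ_right (by omega : (1 : Int) ≤ (k : Int) + 1),
      List.foldl_append, pv_innerA tgt src ((k : Int) + 1) k (by omega)]
    have h2 : (k : Int) + 1 + 1 = (k : Int) + 2 := by ring
    unfold pvAstep
    simp [pvRows, pvBrow, pv_where_eq, String.append_assoc, pv_comma_n, h2]

theorem pv_outerB (src tgt : String) :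
    ∀ (k : Nat), (PySem.List.pyRange 1 ((k : Int) + 1) 1).foldl (pvBstep tgt)
      ([], "(n1:" ++ src ++ ")", "n1 as source, ")
      = (pvRows src tgt k, pvMP src k, pvRP k) := by
  intro k
  induction k with
  | zero => simp [PySem.List.pyRange_one_eq_nil (le_refl (1 : Int)), pvRows, pvMP, pvRP]
  | succ k ih =>
    have hcast : ((k + 1 : Nat) : Int) = (k : Int) + 1 := by push_cast; ring
    rw [hcast, PySem.List.pyRange_one_succ_right (by omega : (1 : Int) ≤ (k : Int) + 1),
      List.foldl_append, ih]
    simp [pvBstep, pvRows, pvMP, pvRP, pvPieceM, pvPieceR, String.append_assoc]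

-- ===== VERDICT (by name: the statement is the Claim_ definition above) =====
theorem get_clauses_spec : Claim_equal_get_clauses := by
  intro src tgt m _
  unfold Spec_get_clauses get_clauses get_clauses_alt
  by_cases hm : m ≤ 0
  · rw [PySem.List.pyRange_one_eq_nil (by omega : m + 1 ≤ 1)]
    rfl
  · obtain ⟨k, rfl⟩ : ∃ k : Nat, m = (k : Int) := ⟨m.toNat, (Int.toNat_of_nonneg (by omega)).symm⟩
    rw [pv_outerA, pv_outerB]
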